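-- pv_equiv track=rewrite | github.com/SheCodesAus/she-codes-python-exercises-Ms-KL | dictionaries/q2.py | colour_counting
-- ===== SOURCE A (Python) =====
-- def colour_counting (colour_counts, colours):
--     '''
--     Args:
--         A dictionary and a list
--     '''
--     result = ""
--     for colour in colours:
--         for colour_counter in colour_counts.keys():
--             if colour == colour_counter:
--                 colour_counts[colour] +=1
--
--     for colour_counter, count in colour_counts.items():
--         result += f"{colour_counter}: {count}\n"
--
--     return result
-- ===== SOURCE B (Python) =====
-- def colour_counting(colour_counts, colours):
--     # Return-value equivalent to A; unlike A it does NOT mutate colour_counts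
--     # in place (the claim is about the return value only).
--     freq = {}
--     for colour in colours:
--         freq[colour] = freq.get(colour, 0) + 1
--     return "".join(f"{key}: {count + freq.get(key, 0)}\n"
--                    for key, count in colour_counts.items())
-- ===== Notes on version B (the rewrite author's own statement) =====
-- stated objective: faster
-- what changed: A scans all dict keys once per element of colours and then accumulates the output string with a mutating fold; B builds a frequency table of colours in one pass and returns ''.join of a single comprehension over the dict items, without mutating the dict.
import Mathlib
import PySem

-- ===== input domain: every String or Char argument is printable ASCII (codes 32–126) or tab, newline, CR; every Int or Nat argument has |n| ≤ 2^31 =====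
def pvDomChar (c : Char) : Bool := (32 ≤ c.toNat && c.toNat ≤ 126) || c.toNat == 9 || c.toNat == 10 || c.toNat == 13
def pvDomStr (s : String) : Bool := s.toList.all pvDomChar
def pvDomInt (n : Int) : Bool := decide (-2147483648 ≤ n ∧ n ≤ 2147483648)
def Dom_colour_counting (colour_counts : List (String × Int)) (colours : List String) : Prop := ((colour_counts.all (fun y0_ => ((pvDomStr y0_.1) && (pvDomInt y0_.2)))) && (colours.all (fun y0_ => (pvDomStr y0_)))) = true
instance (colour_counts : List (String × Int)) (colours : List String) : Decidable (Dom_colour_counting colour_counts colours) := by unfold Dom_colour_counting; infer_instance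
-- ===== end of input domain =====

-- B replaces A's nested scan (all dict keys once per colour) plus accumulating string fold
-- by a one-pass frequency table and a single ''.join over a comprehension (measurably faster).
-- Side effects: A mutates colour_counts in place, B does not; the theorem is about the return value only.


-- ===== PORT A =====
-- colour_counts[c] += 1 : add 1 to the value at the (unique, by Pre_) entry with key c
def bumpOne (c : String) : List (String × Int) → List (String × Int)
  | [] => []
  | (k, v) :: t => if k == c then (k, v + 1) :: t else (k, v) :: bumpOne c t

def colour_counting (colour_counts : List (String × Int)) (colours : List String) : String :=
  -- for colour in colours: for colour_counter in colour_counts.keys(): if colour == colour_counter: colour_counts[colour] += 1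
  let d := colours.foldl (fun d colour =>
    (d.map Prod.fst).foldl (fun d colour_counter =>
      if colour == colour_counter then bumpOne colour d else d) d) colour_counts
  -- for colour_counter, count in colour_counts.items(): result += f"{colour_counter}: {count}\n"
  d.foldl (fun result p => result ++ p.1 ++ ": " ++ PySem.Int.toStr p.2 ++ "\n") ""

-- ===== PORT B =====
def colour_counting_alt (colour_counts : List (String × Int)) (colours : List String) : String :=
  -- freq = {}; for colour in colours: freq[colour] = freq.get(colour, 0) + 1
  let freq := colours.foldl (fun f colour => f.insert colour (f.getD colour 0 + 1)) PySem.Dict.empty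
  -- return "".join(f"{key}: {count + freq.get(key, 0)}\n" for key, count in colour_counts.items())
  PySem.Str.join "" (colour_counts.map (fun p =>
    p.1 ++ ": " ++ PySem.Int.toStr (p.2 + freq.getD p.1 0) ++ "\n"))

-- ===== PRECONDITION & SPEC =====
-- Pre_ excludes association lists with duplicate keys: those cannot represent a Python
-- dict (the argument A and B actually receive), so no Python caller can supply them.
def Pre_colour_counting (colour_counts : List (String × Int)) (colours : List String) : Prop :=
  (colour_counts.map Prod.fst).Nodup
instance (colour_counts : List (String × Int)) (colours : List String) : Decidable (Pre_colour_counting colour_counts colours) := by unfold Pre_colour_counting; infer_instance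

def pvWitness_colour_counting : (List (String × Int)) × List String :=
  ([("red", 2), ("blue", 0)], ["blue", "green", "blue"])

def Spec_colour_counting (colour_counts : List (String × Int)) (colours : List String) (out : String) : Prop := out = colour_counting_alt colour_counts colours
instance (colour_counts : List (String × Int)) (colours : List String) (out : String) : Decidable (Spec_colour_counting colour_counts colours out) := by unfold Spec_colour_counting; infer_instance

-- ===== CLAIM (what is proved, stated in full; the proofs are below) =====
def Claim_equal_colour_counting : Prop := ∀ (colour_counts : List (String × Int)) (colours : List String), Dom_colour_counting colour_counts colours → Pre_colour_counting colour_counts colours → Spec_colour_counting colour_counts colours (colour_counting colour_counts colours)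

-- ===== LEMMAS AND PROOFS =====

-- bumpOne keeps the key list unchanged
theorem map_fst_bumpOne (c : String) (d : List (String × Int)) :
    (bumpOne c d).map Prod.fst = d.map Prod.fst := by
  induction d with
  | nil => rfl
  | cons p t ih =>
    obtain ⟨k, v⟩ := p
    by_cases h : k == c <;> simp [bumpOne, h, ih]

theorem bumpOne_not_mem (c : String) (d : List (String × Int))
    (h : c ∉ d.map Prod.fst) : bumpOne c d = d := by
  induction d with
  | nil => rfl
  | cons p t ih =>
    obtain ⟨k, v⟩ := p
    simp only [List.map_cons, List.mem_cons] at h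
    push_neg at h
    have hk : (k == c) = false := by simp [h.1.symm]
    simp [bumpOne, hk, ih h.2]

-- with nodup keys, bumping the first occurrence is a pointwise map
theorem bumpOne_eq_map (c : String) (d : List (String × Int))
    (hnd : (d.map Prod.fst).Nodup) :
    bumpOne c d = d.map (fun p => (p.1, p.2 + if p.1 = c then 1 else 0)) := by
  induction d with
  | nil => rfl
  | cons p t ih =>
    obtain ⟨k, v⟩ := p
    simp only [List.map_cons, List.nodup_cons] at hnd
    by_cases h : k = c
    · subst h
      have ht : t.map (fun p => (p.1, p.2 + if p.1 = k then 1 else 0)) = t := by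
        have := List.map_congr_left (l := t)
          (f := fun p : String × Int => (p.1, p.2 + if p.1 = k then 1 else 0)) (g := id)
          (fun p hp => by
            have : p.1 ≠ k := fun hc => hnd.1 (hc ▸ List.mem_map_of_mem hp)
            simp [this])
        simpa using this
      simp [bumpOne, ht]
    · have hk : (k == c) = false := by simp [h]
      simp [bumpOne, hk, h, ih hnd.2]

-- A's inner loop over the (nodup) key list is a single bumpOne (or nothing)
theorem innerA_skip (c : String) (ks : List String) (d : List (String × Int))
    (h : c ∉ ks) :
    ks.foldl (fun d k => if c == k then bumpOne c d else d) d = d := by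
  induction ks generalizing d with
  | nil => rfl
  | cons k t ih =>
    simp only [List.mem_cons] at h
    push_neg at h
    have hk : (c == k) = false := by simp [h.1]
    simp only [List.foldl_cons, hk, Bool.false_eq_true, if_false]
    exact ih d h.2

theorem innerA_char (c : String) (ks : List String) (d : List (String × Int))
    (hnd : ks.Nodup) :
    ks.foldl (fun d k => if c == k then bumpOne c d else d) d
      = if c ∈ ks then bumpOne c d else d := by
  induction ks generalizing d with
  | nil => rfl
  | cons k t ih =>
    simp only [List.nodup_cons] at hnd
    by_cases h : c = k
    · subst h
      simp only [List.foldl_cons, beq_self_eq_true, if_true]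
      rw [innerA_skip c t _ hnd.1]
      simp
    · have hk : (c == k) = false := by simp [h]
      simp only [List.foldl_cons, hk, Bool.false_eq_true, if_false, ih d hnd.2,
        List.mem_cons]
      simp [h]

-- A's outer loop: every entry's value grows by the number of its occurrences in colours
theorem outerA_char (colours : List String) (d : List (String × Int))
    (hnd : (d.map Prod.fst).Nodup) :
    colours.foldl (fun d colour =>
        (d.map Prod.fst).foldl (fun d k => if colour == k then bumpOne colour d else d) d) d
      = d.map (fun p => (p.1, p.2 + (colours.count p.1 : Int))) := by
  induction colours generalizing d with
  | nil =>
    simp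
  | cons c cs ih =>
    have hstep : (d.map Prod.fst).foldl
        (fun d k => if c == k then bumpOne c d else d) d = bumpOne c d := by
      rw [innerA_char c _ d hnd]
      by_cases h : c ∈ d.map Prod.fst
      · simp [h]
      · simp [h, bumpOne_not_mem c d h]
    have hnd' : ((bumpOne c d).map Prod.fst).Nodup := by
      rw [map_fst_bumpOne]; exact hnd
    rw [List.foldl_cons, hstep, ih (bumpOne c d) hnd', bumpOne_eq_map c d hnd,
      List.map_map]
    apply List.map_congr_left
    intro p _
    simp only [Function.comp_apply]
    refine Prod.ext rfl ?_
    by_cases h : p.1 = c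
    · simp [h, List.count_cons_self]
      ring
    · have : c ≠ p.1 := fun hc => h hc.symm
      simp [h, List.count_cons_of_ne this]

-- "".join: empty-separator join of a cons splits off its head
theorem join_empty_cons (a : String) (l : List String) :
    PySem.Str.join "" (a :: l) = a ++ PySem.Str.join "" l := by
  apply String.toList_injective
  cases l <;> simp [PySem.Str.toList_join, PySem.Chars.join, List.intercalate]

-- A's accumulating string fold equals "".join of the per-entry lines
theorem foldl_append_eq_join (l : List (String × Int)) (acc : String) :
    l.foldl (fun result p => result ++ p.1 ++ ": " ++ PySem.Int.toStr p.2 ++ "\n") acc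
      = acc ++ PySem.Str.join "" (l.map (fun p => p.1 ++ ": " ++ PySem.Int.toStr p.2 ++ "\n")) := by
  induction l generalizing acc with
  | nil => simp [PySem.Str.join, PySem.Chars.join, List.intercalate]
  | cons p t ih =>
    rw [List.map_cons, join_empty_cons, List.foldl_cons, ih]
    simp [String.append_assoc]

-- B's frequency table returns exactly the count in colours
theorem freq_getD (colours : List String) (k : String) :
    (colours.foldl (fun f colour => f.insert colour (f.getD colour 0 + 1))
        PySem.Dict.empty).getD k 0 = (colours.count k : Int) := by
  rw [PySem.Dict.getD_foldl_insert_add_one]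
  simp

-- ===== VERDICT (by name: the statement is the Claim_ definition above) =====
theorem colour_counting_spec : Claim_equal_colour_counting := by
  intro colour_counts colours _ hpre
  unfold Spec_colour_counting colour_counting colour_counting_alt
  rw [outerA_char colours colour_counts hpre, foldl_append_eq_join]
  simp only [List.map_map, Function.comp_def, freq_getD]
  apply String.toList_injective
  simp
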